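-- pv_equiv track=rewrite | github.com/giorgiobuttiglieri/FirComp | creative_task_3.py | get_common_netmask
-- ===== SOURCE A (Python) =====
-- def get_common_netmask(ip1,ip2):
--     r = ip1^ip2
--     i = 1<<31
--     flag = r&i
--     mask = 0
--     while not flag and i:
--         i >>= 1
--         flag = r & i
--         mask += 1
--     return mask
-- ===== SOURCE B (Python) =====
-- def get_common_netmask(ip1, ip2):
--     return 32 - ((ip1 ^ ip2) & 0xFFFFFFFF).bit_length()
-- ===== Notes on version B (the rewrite author's own statement) =====
-- stated objective: simpler
-- what changed: Replaces the bit-by-bit descending scan loop with a one-line closed form: mask the xor to its low 32 bits and subtract its bit_length from 32.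
import Mathlib
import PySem

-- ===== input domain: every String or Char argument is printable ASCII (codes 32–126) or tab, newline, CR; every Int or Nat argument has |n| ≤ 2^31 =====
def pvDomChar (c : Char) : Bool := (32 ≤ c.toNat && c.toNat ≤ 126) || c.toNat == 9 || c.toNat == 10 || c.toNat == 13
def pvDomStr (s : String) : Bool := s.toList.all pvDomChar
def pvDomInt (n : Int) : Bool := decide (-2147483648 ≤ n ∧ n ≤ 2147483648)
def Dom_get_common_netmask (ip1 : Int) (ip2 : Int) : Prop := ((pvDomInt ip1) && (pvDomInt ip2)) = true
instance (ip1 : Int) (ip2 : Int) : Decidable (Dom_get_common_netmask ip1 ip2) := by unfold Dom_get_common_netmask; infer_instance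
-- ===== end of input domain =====

-- B replaces A's 32-step descending bit scan with a closed form (mask the xor to 32 bits,
-- subtract its bit length from 32); objective: simpler.

-- ===== PORT A =====
-- Python's while loop, as recursion on fuel (the loop runs at most 32 iterations, so
-- fuel 33 is never exhausted; the fuel is only a totality guard, not part of the algorithm).
def pvLoopA (fuel : Nat) (r : Int) (i : Int) (flag : Int) (mask : Int) : Int :=
  match fuel with
  | 0 => mask
  | f + 1 =>
    if flag = 0 ∧ i ≠ 0 then
      let i' := i >>> (1 : Nat)
      pvLoopA f r i' (PySem.Int.band r i') (mask + 1)
    else mask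

def get_common_netmask (ip1 : Int) (ip2 : Int) : Int :=
  let r := PySem.Int.bxor ip1 ip2
  let i : Int := (1 : Int) <<< (31 : Nat)
  let flag := PySem.Int.band r i
  pvLoopA 33 r i flag 0

-- ===== PORT B =====
def get_common_netmask_alt (ip1 : Int) (ip2 : Int) : Int :=
  32 - (PySem.Int.bitLength (PySem.Int.band (PySem.Int.bxor ip1 ip2) 4294967295) : Int)

-- ===== PRECONDITION & SPEC =====
def Spec_get_common_netmask (ip1 : Int) (ip2 : Int) (out : Int) : Prop := out = get_common_netmask_alt ip1 ip2
instance (ip1 : Int) (ip2 : Int) (out : Int) : Decidable (Spec_get_common_netmask ip1 ip2 out) := by unfold Spec_get_common_netmask; infer_instance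

-- ===== CLAIM (what is proved, stated in full; the proofs are below) =====
def Claim_equal_get_common_netmask : Prop := ∀ (ip1 : Int) (ip2 : Int), Dom_get_common_netmask ip1 ip2 → Spec_get_common_netmask ip1 ip2 (get_common_netmask ip1 ip2)

-- ===== LEMMAS AND PROOFS =====

-- the low 32 bits of r, as a Nat
def pvM (r : Int) : Nat := (PySem.Int.band r 4294967295).toNat

theorem pvM_band (r : Int) : PySem.Int.band r 4294967295 = (pvM r : Int) := by
  have h : (0:Int) ≤ PySem.Int.band r 4294967295 := by
    rw [PySem.Int.band_comm]
    exact PySem.Int.band_nonneg_of_nonneg_left r (by norm_num)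
  unfold pvM
  exact (Int.toNat_of_nonneg h).symm

theorem pvM_lt (r : Int) : pvM r < 2 ^ 32 := by
  have hv : Int.toNat 4294967295 = 4294967295 := rfl
  unfold pvM PySem.Int.band
  split
  · rw [if_pos (by norm_num : (0:Int) ≤ 4294967295)]
    have : r.toNat &&& Int.toNat 4294967295 ≤ Int.toNat 4294967295 := Nat.and_le_right
    omega
  · rw [if_pos (by norm_num : (0:Int) ≤ 4294967295)]
    omega

-- parity of the complement: bit k of (2^K - 1 - x) is the negation of bit k of x
theorem pvTestBit_comp (K k x : Nat) (hk : k < K) (hx : x < 2 ^ K) :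
    (2 ^ K - 1 - x).testBit k = !x.testBit k := by
  rw [Nat.testBit_eq_decide_div_mod_eq, Nat.testBit_eq_decide_div_mod_eq]
  have hpos : 0 < 2 ^ k := Nat.two_pow_pos k
  have hKk : 2 ^ K = 2 ^ (K - k) * 2 ^ k := by
    rw [← pow_add]; congr 1; omega
  have hdm := Nat.div_add_mod x (2 ^ k)
  set q := x / 2 ^ k with hq
  set s := x % 2 ^ k with hs
  have hslt : s < 2 ^ k := Nat.mod_lt _ hpos
  have hqlt : q < 2 ^ (K - k) := by
    rw [hq]
    rw [Nat.div_lt_iff_lt_mul hpos]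
    omega
  have hsplit : 2 ^ K - 1 - x = 2 ^ k * (2 ^ (K - k) - 1 - q) + (2 ^ k - 1 - s) := by
    have h1 : 1 ≤ 2 ^ (K - k) := Nat.one_le_two_pow
    have e1 : 2 ^ k * (2 ^ (K - k) - 1 - q) = 2 ^ k * 2 ^ (K - k) - 2 ^ k - 2 ^ k * q := by
      rw [Nat.mul_sub, Nat.mul_sub, Nat.mul_one]
    have e2 : 2 ^ K = 2 ^ k * 2 ^ (K - k) := by rw [← pow_add]; congr 1; omega
    have e3 : 2 ^ k * (q + 1) ≤ 2 ^ k * 2 ^ (K - k) := Nat.mul_le_mul_left _ hqlt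
    have e4 : 2 ^ k * (q + 1) = 2 ^ k * q + 2 ^ k := by ring
    omega
  have hdiv : (2 ^ K - 1 - x) / 2 ^ k = 2 ^ (K - k) - 1 - q := by
    rw [hsplit, Nat.mul_add_div hpos]
    have : (2 ^ k - 1 - s) / 2 ^ k = 0 := Nat.div_eq_of_lt (by omega)
    omega
  rw [hdiv]
  have hev : 2 ^ (K - k) = 2 * 2 ^ (K - k - 1) := by
    rw [← pow_succ']
    congr 1; omega
  have hqm : q % 2 = 0 ∨ q % 2 = 1 := Nat.mod_two_eq_zero_or_one q
  rcases hqm with h | h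
  · have hc : (2 ^ (K - k) - 1 - q) % 2 = 1 := by omega
    simp [h, hc]
  · have hc : (2 ^ (K - k) - 1 - q) % 2 = 0 := by omega
    simp [h, hc]

-- bit k of r (for k ≤ 31), read through the 32-bit mask: r & 2^k = (pvM r) &&& 2^k
theorem pvBand_pow (r : Int) (k : Nat) (hk : k < 32) :
    PySem.Int.band r ((2 : Int) ^ k) = ((pvM r &&& 2 ^ k : Nat) : Int) := by
  have hcast : ((2 : Int) ^ k) = ((2 ^ k : Nat) : Int) := by push_cast; ring
  by_cases hr : (0 : Int) ≤ r
  · -- nonnegative r: everything is Nat &&&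
    have h1 : PySem.Int.band r ((2 : Int) ^ k) = ((r.toNat &&& 2 ^ k : Nat) : Int) := by
      rw [hcast, PySem.Int.band_of_nonneg hr (by positivity), Int.toNat_natCast]
    have h2 : pvM r = r.toNat % 2 ^ 32 := by
      unfold pvM
      rw [show (4294967295 : Int) = ((2 ^ 32 - 1 : Nat) : Int) from by norm_num]
      rw [PySem.Int.band_of_nonneg hr (by positivity)]
      simp only [Int.toNat_natCast, Nat.and_two_pow_sub_one_eq_mod]
    rw [h1, h2]
    congr 1
    apply Nat.eq_of_testBit_eq
    intro i
    simp only [Nat.testBit_land, Nat.testBit_two_pow, Nat.testBit_mod_two_pow]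
    by_cases h : k = i
    · subst h; simp [hk]
    · simp [h]
  · -- negative r: band goes through the complement (-r-1).toNat
    rw [Int.not_le] at hr
    set n := (-r - 1).toNat with hn
    have hb : ∀ b : Int, 0 ≤ b →
        PySem.Int.band r b = ((b.toNat - (b.toNat &&& n) : Nat) : Int) := by
      intro b hbn
      unfold PySem.Int.band
      rw [if_neg (by omega), if_pos hbn]
    have h1 : PySem.Int.band r ((2 : Int) ^ k) =
        ((2 ^ k - (2 ^ k &&& n) : Nat) : Int) := by
      rw [hb _ (by positivity)]
      congr 2 <;> rw [hcast] <;> simp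
    have h2 : pvM r = 2 ^ 32 - 1 - n % 2 ^ 32 := by
      unfold pvM
      rw [show (4294967295 : Int) = ((2 ^ 32 - 1 : Nat) : Int) from by norm_num]
      rw [hb _ (by positivity)]
      simp only [Int.toNat_natCast]
      rw [Nat.land_comm, Nat.and_two_pow_sub_one_eq_mod]
    rw [h1, h2]
    congr 1
    have hbit : (2 ^ 32 - 1 - n % 2 ^ 32).testBit k = !n.testBit k := by
      rw [pvTestBit_comp 32 k _ hk (Nat.mod_lt _ (by norm_num))]
      rw [Nat.testBit_mod_two_pow]
      simp [hk]
    rw [Nat.and_two_pow, hbit, Nat.two_pow_and]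
    cases h : n.testBit k <;> simp [h] <;> omega

-- Python's bit_length of a natural number is Nat.size
theorem pvBitLength_size (m : Nat) : PySem.Int.bitLength (m : Int) = Nat.size m := by
  rcases Nat.eq_zero_or_pos m with h | h
  · subst h; simp [PySem.Int.bitLength_zero]
  · apply le_antisymm
    · have h2 := PySem.Int.two_pow_bitLength_le (m : Int) (by exact_mod_cast h.ne')
      simp only [Int.natAbs_natCast] at h2
      have := Nat.lt_size.mpr h2
      omega
    · have h1 := PySem.Int.lt_two_pow_bitLength (m : Int)
      simp only [Int.natAbs_natCast] at h1
      exact Nat.size_le.mpr h1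

-- the loop invariant: scanning down from bit p with all higher (low-32) bits of r zero
theorem pvLoopA_eq (r : Int) : ∀ (p fuel : Nat) (mask : Int), p < 32 → p + 2 ≤ fuel →
    pvM r < 2 ^ (p + 1) →
    pvLoopA fuel r ((2 : Int) ^ p) (PySem.Int.band r ((2 : Int) ^ p)) mask
      = mask + ((p + 1 - Nat.size (pvM r) : Nat) : Int) := by
  intro p
  induction p with
  | zero =>
    intro fuel mask hp hfuel hm
    obtain ⟨f, rfl⟩ : ∃ f, fuel = f + 2 := ⟨fuel - 2, by omega⟩
    rw [pvBand_pow r 0 (by norm_num)]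
    have hm2 : pvM r < 2 := by simpa using hm
    interval_cases h : pvM r
    · -- pvM r = 0 : bit 0 clear, one more iteration with i = 0, then exit
      simp only [pvLoopA, pow_zero]
      rw [if_pos (by constructor <;> simp [h])]
      have : (1 : Int) >>> (1 : Nat) = 0 := by decide
      rw [this, PySem.Int.band_zero]
      simp [pvLoopA, Nat.size_eq_zero]
    · -- pvM r = 1 : bit 0 set, loop exits at once
      simp only [pvLoopA, pow_zero]
      rw [if_neg (by simp [h])]
      have : Nat.size 1 = 1 := by decide
      simp [this]
  | succ p ih =>
    intro fuel mask hp hfuel hm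
    obtain ⟨f, rfl⟩ : ∃ f, fuel = f + 1 := ⟨fuel - 1, by omega⟩
    rw [pvBand_pow r (p + 1) (by omega)]
    have hppos : (0:Nat) < 2 ^ (p + 1) := Nat.two_pow_pos _
    by_cases hbit : (pvM r).testBit (p + 1)
    · -- bit p+1 set: loop exits, size = p+2
      have hand : pvM r &&& 2 ^ (p + 1) = 2 ^ (p + 1) := by
        rw [Nat.and_two_pow, hbit]; simp
      have hge : 2 ^ (p + 1) ≤ pvM r := hand ▸ Nat.and_le_left
      have hsz : Nat.size (pvM r) = p + 2 := by
        have h1 := Nat.lt_size.mpr hge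
        have h2 := Nat.size_le.mpr hm
        omega
      simp only [pvLoopA]
      have hne : ((2 ^ (p + 1) : Nat) : Int) ≠ 0 := by positivity
      rw [if_neg (fun hcon => hne (hand ▸ hcon.1))]
      simp [hsz]
    · -- bit p+1 clear: shift down and recurse
      have hb' : (pvM r).testBit (p + 1) = false := by simpa using hbit
      have hand : pvM r &&& 2 ^ (p + 1) = 0 := by
        rw [Nat.and_two_pow, hb']; simp
      have hlt : pvM r < 2 ^ (p + 1) := by
        have hpow : (2:Nat) ^ (p + 2) = 2 * 2 ^ (p + 1) := by ring
        obtain ⟨q, hq⟩ : ∃ q, pvM r / 2 ^ (p + 1) = q := ⟨_, rfl⟩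
        have hdiv : q < 2 := hq ▸ (Nat.div_lt_iff_lt_mul hppos).mpr (by omega)
        have htb : ¬ (q % 2 = 1) := by
          rw [Nat.testBit_eq_decide_div_mod_eq, hq] at hb'
          simpa using hb'
        have hz : q = 0 := by omega
        have hdm := Nat.div_add_mod (pvM r) (2 ^ (p + 1))
        rw [hq, hz, Nat.mul_zero, Nat.zero_add] at hdm
        have hmod : pvM r % 2 ^ (p + 1) < 2 ^ (p + 1) := Nat.mod_lt _ hppos
        rw [hdm] at hmod
        exact hmod
      have hshift : ((2 : Int) ^ (p + 1)) >>> (1 : Nat) = (2 : Int) ^ p := by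
        have h1 : ((2 : Int) ^ (p + 1)) = ((2 ^ (p + 1) : Nat) : Int) := by push_cast; ring
        have h2 : ((2 ^ (p + 1) : Nat) : Int) >>> (1 : Nat) = ((2 ^ (p + 1) >>> 1 : Nat) : Int) := rfl
        rw [h1, h2, Nat.shiftRight_one, pow_succ, Nat.mul_div_cancel _ (by norm_num)]
        push_cast; ring
      simp only [pvLoopA]
      rw [if_pos ⟨by rw [hand]; simp, by positivity⟩]
      simp only [hshift]
      rw [ih f (mask + 1) (by omega) (by omega) hlt]
      have hsz := Nat.size_le.mpr hlt
      push_cast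
      omega

-- ===== VERDICT (by name: the statement is the Claim_ definition above) =====
theorem get_common_netmask_spec : Claim_equal_get_common_netmask := by
  intro ip1 ip2 _
  unfold Spec_get_common_netmask get_common_netmask get_common_netmask_alt
  set r := PySem.Int.bxor ip1 ip2 with hr
  have h31 : (1 : Int) <<< (31 : Nat) = (2 : Int) ^ 31 := by decide
  simp only [h31]
  rw [pvLoopA_eq r 31 33 0 (by norm_num) (by norm_num) (pvM_lt r)]
  rw [pvM_band r, pvBitLength_size (pvM r)]
  have hsz : Nat.size (pvM r) ≤ 32 := Nat.size_le.mpr (pvM_lt r)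
  push_cast
  omega
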